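-- pv_equiv track=rewrite | github.com/Aeee90/python | algorism/hackerank/WeightedUniformStrings.py | analysisStr
-- ===== SOURCE A (Python) =====
-- def analysisStr(str):
--     result = []
--     preStack = 0
--     preC = None
--     w = 0
--     for i in range(len(str)):
--         w = ord(str[i]) - 96
--
--         if str[i-1] is str[i]:
--             w += preStack
--
--         result.append(w)
--         preStack = w
--
--     return set(result)
-- ===== SOURCE B (Python) =====
-- def analysisStr(str):
--     seen = set()
--     n = len(str)
--     i = 0
--     while i < n:
--         j = i + 1
--         while j < n and str[j] is str[i]:
--             j += 1
--         w = ord(str[i]) - 96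
--         for k in range(1, j - i + 1):
--             seen.add(k * w)
--         i = j
--     return seen
-- ===== Notes on version B (the rewrite author's own statement) =====
-- stated objective: alternative
-- what changed: Replaces the per-index loop carrying a preStack accumulator (plus a wrap-around str[-1] comparison at i=0) with a two-level scan that splits the string into maximal runs of identical characters and adds the arithmetic progression w,2w,...,Lw for each run directly into the set.
import Mathlib
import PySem

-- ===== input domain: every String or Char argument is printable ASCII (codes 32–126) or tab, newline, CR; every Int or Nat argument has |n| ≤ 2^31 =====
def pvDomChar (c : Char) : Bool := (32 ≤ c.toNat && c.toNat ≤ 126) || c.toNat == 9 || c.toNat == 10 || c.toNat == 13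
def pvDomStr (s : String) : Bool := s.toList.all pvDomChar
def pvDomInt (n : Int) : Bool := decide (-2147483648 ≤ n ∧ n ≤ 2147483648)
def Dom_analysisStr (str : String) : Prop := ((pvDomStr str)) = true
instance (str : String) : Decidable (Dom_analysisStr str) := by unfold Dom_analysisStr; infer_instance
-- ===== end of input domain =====

-- B replaces A's per-index loop with a preStack accumulator by a run-decomposition scan
-- (maximal runs of equal chars; per run of weight w and length L add w,2w,…,Lw); same cost, different structure.
-- A's `is` comparison equals `==` on the ASCII domain, so both ports compare characters by equality.

-- ===== PORT A =====
-- loop body: state = (result, preStack); i is the Python loop index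
def aBody (cs : List Char) (st : List Int × Int) (i : Int) : List Int × Int :=
  let w0 : Int := (((PySem.List.pyGet? cs i).getD ' ').toNat : Int) - 96
  let w : Int := if PySem.List.pyGet? cs (i - 1) = PySem.List.pyGet? cs i then w0 + st.2 else w0
  (st.1 ++ [w], w)

def analysisStr (str : String) : List Int :=
  PySem.Set.ofList ((PySem.List.pyRange 0 (PySem.Str.len str) 1).foldl (aBody str.toList) ([], 0)).1

-- ===== PORT B =====
-- transcription of Source B's while-loop: each step consumes one maximal run of the head char
def bLoop (seen : PySem.Set Int) (cs : List Char) : PySem.Set Int :=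
  match cs with
  | [] => seen
  | c :: rest =>
    let t := rest.takeWhile (fun x => x == c)
    let w : Int := (c.toNat : Int) - 96
    let seen' := (PySem.List.pyRange 1 ((t.length : Int) + 2) 1).foldl
        (fun s k => PySem.Set.add s (k * w)) seen
    bLoop seen' (rest.drop t.length)
termination_by cs.length
decreasing_by
  simp only [List.length_drop, List.length_cons]
  omega

def analysisStr_alt (str : String) : List Int :=
  bLoop PySem.Set.empty str.toList

-- ===== PRECONDITION & SPEC =====
def Spec_analysisStr (str : String) (out : List Int) : Prop := out = analysisStr_alt str
instance (str : String) (out : List Int) : Decidable (Spec_analysisStr str out) := by unfold Spec_analysisStr; infer_instance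

-- ===== CLAIM (what is proved, stated in full; the proofs are below) =====
def Claim_equal_analysisStr : Prop := ∀ (str : String), Dom_analysisStr str → Spec_analysisStr str (analysisStr str)

-- ===== LEMMAS AND PROOFS =====

-- weight of a character
def wOf (c : Char) : Int := (c.toNat : Int) - 96

-- recursive characterisation of A's loop from index ≥ 1 on: p = previous char, pre = preStack
def aRec (p : Char) (pre : Int) : List Char → List Int
  | [] => []
  | c :: rest =>
    let w := if c = p then wOf c + pre else wOf c
    w :: aRec c w rest

-- A's full result list
def resA : List Char → List Int
  | [] => []
  | c :: rest => wOf c :: aRec c (wOf c) rest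

-- the flat list of values B inserts, in insertion order
def bList : List Char → List Int
  | [] => []
  | c :: rest =>
    let t := rest.takeWhile (fun x => x == c)
    ((PySem.List.pyRange 1 ((t.length : Int) + 2) 1).map (· * wOf c)) ++ bList (rest.drop t.length)
termination_by cs => cs.length
decreasing_by
  simp only [List.length_drop, List.length_cons]
  omega

theorem foldA_eq (cs : List Char) (fuel : Nat) : ∀ (k : Nat), 1 ≤ k → k ≤ cs.length →
    cs.length - k ≤ fuel → ∀ (res : List Int) (pre : Int),
    ((PySem.List.pyRange (k : Int) (cs.length : Int) 1).foldl (aBody cs) (res, pre)).1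
      = res ++ aRec (cs.getD (k - 1) ' ') pre (cs.drop k) := by
  induction fuel with
  | zero =>
    intro k h1 h2 hf res pre
    have hk : k = cs.length := by omega
    subst hk
    simp [PySem.List.pyRange_one_eq_nil (le_refl _), aRec]
  | succ n ih =>
    intro k h1 h2 hf res pre
    by_cases hlt : k < cs.length
    · have hcons : PySem.List.pyRange (k : Int) (cs.length : Int) 1
          = (k : Int) :: PySem.List.pyRange ((k : Int) + 1) (cs.length : Int) 1 :=
        PySem.List.pyRange_one_cons (by exact_mod_cast hlt)
      rw [hcons, List.foldl_cons]
      have hget : PySem.List.pyGet? cs (k : Int) = some cs[k] := by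
        simp [PySem.List.pyGet?_natCast, List.getElem?_eq_getElem hlt]
      have hget' : PySem.List.pyGet? cs ((k : Int) - 1) = some cs[k - 1] := by
        have : ((k : Int) - 1) = ((k - 1 : Nat) : Int) := by omega
        rw [this]
        simp [PySem.List.pyGet?_natCast, List.getElem?_eq_getElem (by omega : k - 1 < cs.length)]
      have hbody : aBody cs (res, pre) (k : Int)
          = (res ++ [if cs[k - 1] = cs[k] then wOf cs[k] + pre else wOf cs[k]],
             if cs[k - 1] = cs[k] then wOf cs[k] + pre else wOf cs[k]) := by
        simp only [aBody, hget, hget', Option.getD_some, Option.some.injEq, wOf]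
      rw [hbody]
      have hcast : ((k : Int) + 1) = ((k + 1 : Nat) : Int) := by omega
      rw [hcast, ih (k + 1) (by omega) (by omega) (by omega)]
      have hdrop : cs.drop k = cs[k] :: cs.drop (k + 1) := (List.getElem_cons_drop hlt).symm
      rw [hdrop]
      have hgd1 : cs.getD (k - 1) ' ' = cs[k - 1] := List.getD_eq_getElem cs ' ' (by omega)
      have hgd2 : cs.getD (k + 1 - 1) ' ' = cs[k] := List.getD_eq_getElem cs ' ' (by omega)
      rw [hgd1, hgd2]
      simp only [aRec]
      by_cases he : cs[k - 1] = cs[k]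
      · rw [if_pos he, if_pos he.symm]; simp
      · rw [if_neg he, if_neg (fun hx => he hx.symm)]; simp
    · have hk : k = cs.length := by omega
      subst hk
      simp [PySem.List.pyRange_one_eq_nil (le_refl _), aRec]

theorem analysisStr_eq_resA (str : String) :
    analysisStr str = PySem.Set.ofList (resA str.toList) := by
  unfold analysisStr
  cases hcs : str.toList with
  | nil => simp [hcs, PySem.Str.len_eq, resA, PySem.List.pyRange_one_eq_nil]
  | cons c rest =>
    have hlen : PySem.Str.len str = ((c :: rest).length : Int) := by
      simp [PySem.Str.len_eq, hcs]
    rw [hlen]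
    have hpos : (0 : Int) < ((c :: rest).length : Int) := by
      simp
    rw [PySem.List.pyRange_one_cons hpos, List.foldl_cons]
    have hget : PySem.List.pyGet? (c :: rest) (0 : Int) = some c := by
      simp [PySem.List.pyGet?, PySem.List.pyIdx?]
    have hbody : aBody (c :: rest) ([], 0) 0 = ([wOf c], wOf c) := by
      by_cases hp : PySem.List.pyGet? (c :: rest) ((0 : Int) - 1) = PySem.List.pyGet? (c :: rest) (0 : Int) <;>
        simp [aBody, wOf]
    rw [hbody]
    have := foldA_eq (c :: rest) (c :: rest).length 1 (by omega) (by simp) (by omega) [wOf c] (wOf c)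
    rw [(by norm_num : ((0:Int) + 1) = ((1 : Nat) : Int)), this]
    simp [resA]

-- B's loop is "update the seen-set with bList"
theorem bLoop_eq_update (cs : List Char) (fuel : Nat) : cs.length ≤ fuel →
    ∀ (seen : PySem.Set Int), bLoop seen cs = PySem.Set.update seen (bList cs) := by
  induction fuel generalizing cs with
  | zero =>
    intro h seen
    have : cs = [] := by cases cs <;> simp_all
    subst this
    simp [bLoop, bList, PySem.Set.update]
  | succ n ih =>
    intro h seen
    cases cs with
    | nil => simp [bLoop, bList, PySem.Set.update]
    | cons c rest =>
      rw [bLoop, bList]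
      have hlen : (rest.drop (rest.takeWhile (fun x => x == c)).length).length ≤ n := by
        simp only [List.length_drop]
        have := h; simp at this; omega
      rw [ih _ hlen]
      simp only [PySem.Set.update, List.foldl_append, List.foldl_map, wOf]

-- a run of j copies of c, entered with preStack k * wOf c, yields the next j multiples
theorem aRec_run (c : Char) (j : Nat) : ∀ (k : Int) (r : List Char),
    aRec c (k * wOf c) (List.replicate j c ++ r)
      = (PySem.List.pyRange (k + 1) (k + 1 + j) 1).map (· * wOf c)
        ++ aRec c ((k + j) * wOf c) r := by
  induction j with
  | zero =>
    intro k r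
    simp [PySem.List.pyRange_one_eq_nil (le_refl _)]
  | succ j ih =>
    intro k r
    rw [List.replicate_succ, List.cons_append]
    have hstep : aRec c (k * wOf c) (c :: (List.replicate j c ++ r))
        = ((k + 1) * wOf c) :: aRec c ((k + 1) * wOf c) (List.replicate j c ++ r) := by
      have hw : wOf c + k * wOf c = (k + 1) * wOf c := by ring
      simp [aRec, hw]
    rw [hstep, ih (k + 1) r]
    have hcons : PySem.List.pyRange (k + 1) (k + 1 + ((j + 1 : Nat) : Int)) 1
        = (k + 1) :: PySem.List.pyRange (k + 1 + 1) (k + 1 + ((j + 1 : Nat) : Int)) 1 :=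
      PySem.List.pyRange_one_cons (by push_cast; omega)
    rw [hcons]
    have e1 : (k + 1 + 1 : Int) = k + 2 := by ring
    have e2 : (k + 1 + ((j + 1 : Nat) : Int)) = k + 2 + (j : Int) := by push_cast; ring
    have e3 : (k + ((j + 1 : Nat) : Int)) = k + 1 + (j : Int) := by push_cast; ring
    rw [e1, e2, e3]
    simp

-- after a run, the next char (if any) differs from the run char, so preStack is ignored
theorem aRec_fresh (c : Char) (pre : Int) (r : List Char)
    (h : ∀ d, r.head? = some d → d ≠ c) : aRec c pre r = resA r := by
  cases r with
  | nil => simp [aRec, resA]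
  | cons d r' =>
    have hd : d ≠ c := h d rfl
    simp [aRec, resA, hd]

theorem head_drop_takeWhile (p : Char → Bool) : ∀ (l : List Char) (d : Char),
    (l.drop (l.takeWhile p).length).head? = some d → p d = false := by
  intro l
  induction l with
  | nil => simp
  | cons a l ih =>
    intro d
    by_cases hp : p a
    · simp only [List.takeWhile_cons, hp, if_true, List.length_cons, List.drop_succ_cons]
      exact ih d
    · intro hh
      have hcons : (a :: l).takeWhile p = [] := by simp [hp]
      rw [hcons] at hh
      simp only [List.length_nil, List.drop_zero, List.head?_cons, Option.some.injEq] at hh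
      subst hh
      simpa using hp

theorem resA_eq_bList (cs : List Char) (fuel : Nat) : cs.length ≤ fuel →
    resA cs = bList cs := by
  induction fuel generalizing cs with
  | zero =>
    intro h
    have : cs = [] := by cases cs <;> simp_all
    subst this; simp [resA, bList]
  | succ n ih =>
    intro h
    cases cs with
    | nil => simp [resA, bList]
    | cons c rest =>
      rw [resA, bList]
      set t := rest.takeWhile (fun x => x == c) with ht
      set r := rest.drop t.length with hr
      have htrep : t = List.replicate t.length c := by
        apply List.eq_replicate_of_mem
        intro b hb
        rw [ht] at hb
        have hpb := List.mem_takeWhile_imp hb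
        simpa using hpb
      have hsplit : rest = t ++ r := by
        conv_lhs => rw [← List.take_append_drop t.length rest]
        rw [hr]
        congr 1
        rw [ht]
        exact (List.prefix_iff_eq_take.mp (List.takeWhile_prefix _)).symm
      have hhead : ∀ d, r.head? = some d → d ≠ c := by
        intro d hd
        have := head_drop_takeWhile (fun x => x == c) rest d (by rw [← ht, ← hr]; exact hd)
        simpa using this
      have hlr : r.length ≤ n := by
        have h2 : rest.length ≤ n := by
          simp only [List.length_cons] at h; omega
        have h3 : r.length ≤ rest.length := by rw [hr]; simp
        omega
      calc wOf c :: aRec c (wOf c) rest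
          = wOf c :: aRec c (1 * wOf c) (List.replicate t.length c ++ r) := by
            rw [one_mul, ← htrep, ← hsplit]
        _ = wOf c :: ((PySem.List.pyRange (1 + 1) (1 + 1 + (t.length : Int)) 1).map (· * wOf c)
              ++ aRec c ((1 + (t.length : Int)) * wOf c) r) := by
            rw [aRec_run c t.length 1 r]
        _ = ((PySem.List.pyRange 1 ((t.length : Int) + 2) 1).map (· * wOf c)) ++ bList r := by
            rw [aRec_fresh c _ r hhead, ih r hlr]
            have hc2 : PySem.List.pyRange 1 ((t.length : Int) + 2) 1
                = 1 :: PySem.List.pyRange 2 ((t.length : Int) + 2) 1 :=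
              PySem.List.pyRange_one_cons (by omega)
            rw [hc2]
            rw [show ((1 : Int) + 1 + (t.length : Int)) = (t.length : Int) + 2 from by ring,
              show ((1 : Int) + 1) = 2 from by norm_num]
            simp

theorem alt_eq_ofList_bList (str : String) :
    analysisStr_alt str = PySem.Set.ofList (bList str.toList) := by
  unfold analysisStr_alt
  rw [bLoop_eq_update str.toList str.toList.length (le_refl _)]
  simp [PySem.Set.ofList_eq_foldl, PySem.Set.update, PySem.Set.empty]

-- ===== VERDICT (by name: the statement is the Claim_ definition above) =====
theorem analysisStr_spec : Claim_equal_analysisStr := by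
  intro str _
  unfold Spec_analysisStr
  rw [analysisStr_eq_resA, alt_eq_ofList_bList,
    resA_eq_bList str.toList str.toList.length (le_refl _)]
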